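-- pv_equiv track=rewrite | github.com/alanssitis/engr162-project3 | files_from_demo/map_generator.py | calculate_dimension
-- ===== SOURCE A (Python) =====
-- def calculate_dimension(moves):
--     """Get the dimensions of the map matrix
--
--     Args:
--         moves (list): contains a list of all moves made by the truck [direction, distance]
--
--     Returns:
--         int: dimensions of matrix
--     """
--     x = 0
--     y = 0
--     x_min = 0
--     x_max = 0
--     height = 0
--
--     for move in moves:
--         if move[0] in [4, 5, 6]:
--             pass
--         elif move[0] % 2 == 0:
--             y += (1 - move[0]) * move[1]
--             if y > height:
--                 height = y
--         else:
--             x += (2 - move[0]) * move[1]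
--             if x > x_max:
--                 x_max += x - x_max
--             elif x < x_min:
--                 x_min += x - x_min
--
--     width = x_max - x_min + 1
--     start = - x_min
--
--     return width, height, start, x, y
-- ===== SOURCE B (Python) =====
-- def calculate_dimension(moves):
--     """Get the dimensions of the map matrix
--
--     Build-then-reduce: accumulate per-axis prefix trajectories, then reduce
--     with max/min (seeded by the initial 0 at the head of each table).
--     """
--     xs = [0]
--     ys = [0]
--     for m in moves:
--         d = m[0]
--         if d in (4, 5, 6):
--             continue
--         if d % 2 == 0:
--             ys.append(ys[-1] + (1 - d) * m[1])
--         else: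
--             xs.append(xs[-1] + (2 - d) * m[1])
--     x_max = max(xs)
--     x_min = min(xs)
--     return x_max - x_min + 1, max(ys), -x_min, xs[-1], ys[-1]
-- ===== Notes on version B (the rewrite author's own statement) =====
-- stated objective: alternative
-- what changed: A fuses the scan with live min/max/height updates in one quintuple of running variables; B first builds the per-axis cumulative trajectory tables (seeded with 0) in one pass and then reduces them with max/min and last-element reads.
import Mathlib
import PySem

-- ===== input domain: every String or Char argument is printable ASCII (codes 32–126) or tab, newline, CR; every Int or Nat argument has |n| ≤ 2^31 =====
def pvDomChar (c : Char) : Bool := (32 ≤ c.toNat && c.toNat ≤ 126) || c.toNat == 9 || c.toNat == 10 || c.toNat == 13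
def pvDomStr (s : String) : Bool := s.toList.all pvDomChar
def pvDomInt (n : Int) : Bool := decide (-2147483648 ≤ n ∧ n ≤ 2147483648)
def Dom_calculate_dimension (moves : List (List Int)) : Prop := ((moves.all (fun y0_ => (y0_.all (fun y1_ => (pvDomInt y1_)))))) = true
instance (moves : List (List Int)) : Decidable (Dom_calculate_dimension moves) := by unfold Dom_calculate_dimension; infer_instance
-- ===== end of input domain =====

-- B replaces A's fused live-updating scan by building per-axis cumulative trajectory tables and reducing them with max/min afterwards; same return value.

-- ===== PORT A =====
-- one loop step of A over the state (x, y, x_min, x_max, height)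
def calcAStep (s : Int × Int × Int × Int × Int) (m : List Int) : Int × Int × Int × Int × Int :=
  let (x, y, x_min, x_max, height) := s
  let d := PySem.List.pyGetD m 0 0
  if d = 4 ∨ d = 5 ∨ d = 6 then
    (x, y, x_min, x_max, height)
  else if PySem.Int.mod d 2 = 0 then
    let y' := y + (1 - d) * PySem.List.pyGetD m 1 0
    (x, y', x_min, x_max, if y' > height then y' else height)
  else
    let x' := x + (2 - d) * PySem.List.pyGetD m 1 0
    if x' > x_max then (x', y, x_min, x_max + (x' - x_max), height)
    else if x' < x_min then (x', y, x_min + (x' - x_min), x_max, height)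
    else (x', y, x_min, x_max, height)

def calculate_dimension (moves : List (List Int)) : Int × Int × Int × Int × Int :=
  let (x, y, x_min, x_max, height) := moves.foldl calcAStep (0, 0, 0, 0, 0)
  (x_max - x_min + 1, height, - x_min, x, y)

-- ===== PORT B =====
-- one loop step of B over the pair of trajectory tables (xs, ys)
def calcBStep (s : List Int × List Int) (m : List Int) : List Int × List Int :=
  let d := PySem.List.pyGetD m 0 0
  if d = 4 ∨ d = 5 ∨ d = 6 then s
  else if PySem.Int.mod d 2 = 0 then
    (s.1, s.2 ++ [PySem.List.pyGetD s.2 (-1) 0 + (1 - d) * PySem.List.pyGetD m 1 0])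
  else
    (s.1 ++ [PySem.List.pyGetD s.1 (-1) 0 + (2 - d) * PySem.List.pyGetD m 1 0], s.2)

def calculate_dimension_alt (moves : List (List Int)) : Int × Int × Int × Int × Int :=
  let (xs, ys) := moves.foldl calcBStep ([0], [0])
  let x_max := (PySem.List.max? xs (fun v => v)).getD 0
  let x_min := (PySem.List.min? xs (fun v => v)).getD 0
  (x_max - x_min + 1, (PySem.List.max? ys (fun v => v)).getD 0, - x_min,
   PySem.List.pyGetD xs (-1) 0, PySem.List.pyGetD ys (-1) 0)

-- ===== PRECONDITION & SPEC =====
-- Pre_ excludes exactly the inputs on which the Python A raises IndexError: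
-- a move that is empty, or (when its direction is not 4/5/6) has no distance entry.
def Pre_calculate_dimension (moves : List (List Int)) : Prop :=
  ∀ m ∈ moves, 1 ≤ m.length ∧
    (¬ (m.getD 0 0 = 4 ∨ m.getD 0 0 = 5 ∨ m.getD 0 0 = 6) → 2 ≤ m.length)
instance (moves : List (List Int)) : Decidable (Pre_calculate_dimension moves) := by
  unfold Pre_calculate_dimension; infer_instance
def pvWitness_calculate_dimension : List (List Int) := [[1, 3], [2, 2], [4], [3, 1]]

def Spec_calculate_dimension (moves : List (List Int)) (out : Int × Int × Int × Int × Int) : Prop := out = calculate_dimension_alt moves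
instance (moves : List (List Int)) (out : Int × Int × Int × Int × Int) : Decidable (Spec_calculate_dimension moves out) := by unfold Spec_calculate_dimension; infer_instance

-- ===== CLAIM (what is proved, stated in full; the proofs are below) =====
def Claim_equal_calculate_dimension : Prop := ∀ (moves : List (List Int)), Dom_calculate_dimension moves → Pre_calculate_dimension moves → Spec_calculate_dimension moves (calculate_dimension moves)

-- ===== LEMMAS AND PROOFS =====

-- abbreviations for the three reductions B performs on a table
def lastv (xs : List Int) : Int := PySem.List.pyGetD xs (-1) 0
def maxv (xs : List Int) : Int := (PySem.List.max? xs (fun v => v)).getD 0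
def minv (xs : List Int) : Int := (PySem.List.min? xs (fun v => v)).getD 0

theorem lastv_append (xs : List Int) (v : Int) : lastv (xs ++ [v]) = v := by
  simp [lastv, PySem.List.pyGetD_neg_one_append_singleton]

theorem maxv_cons (x : Int) (t : List Int) : maxv (x :: t) = t.foldl max x := by
  simp [maxv, PySem.List.max?_id_cons]

theorem minv_cons (x : Int) (t : List Int) : minv (x :: t) = t.foldl min x := by
  simp [minv, PySem.List.min?_id_cons]

theorem maxv_append (x : Int) (t : List Int) (v : Int) :
    maxv ((x :: t) ++ [v]) = max (maxv (x :: t)) v := by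
  simp [maxv_cons, List.foldl_append]

theorem minv_append (x : Int) (t : List Int) (v : Int) :
    minv ((x :: t) ++ [v]) = min (minv (x :: t)) v := by
  simp [minv_cons, List.foldl_append]

theorem minv_le_maxv (x : Int) (t : List Int) : minv (x :: t) ≤ maxv (x :: t) := by
  obtain ⟨m, hm⟩ : ∃ m, PySem.List.min? (x :: t) (fun v => v) = some m := by
    cases h : PySem.List.min? (x :: t) (fun v => v) with
    | none => exact absurd ((PySem.List.min?_eq_none_iff _ _).mp h) (by simp)
    | some m => exact ⟨m, rfl⟩
  obtain ⟨M, hM⟩ : ∃ M, PySem.List.max? (x :: t) (fun v => v) = some M := by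
    cases h : PySem.List.max? (x :: t) (fun v => v) with
    | none => exact absurd ((PySem.List.max?_eq_none_iff _ _).mp h) (by simp)
    | some M => exact ⟨M, rfl⟩
  have h1 : m ∈ x :: t := PySem.List.min?_mem hm
  have h2 := PySem.List.max?_isMax hM m h1
  simp [minv, maxv, hm, hM]
  exact h2

theorem ite_gt_max (a b : Int) : (if a > b then a else b) = max b a := by
  rcases lt_or_ge b a with h | h
  · simp [max_eq_right h.le, h]
  · simp [not_lt.mpr h, max_eq_left h]

-- main invariant: running A's loop from a state read off nonempty tables
-- equals reading the same state off B's final tables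
theorem main_inv (rest : List (List Int)) (x : Int) (xt : List Int) (y : Int) (yt : List Int) :
    rest.foldl calcAStep
      (lastv (x :: xt), lastv (y :: yt), minv (x :: xt), maxv (x :: xt), maxv (y :: yt))
    = (let (xs, ys) := rest.foldl calcBStep (x :: xt, y :: yt)
       (lastv xs, lastv ys, minv xs, maxv xs, maxv ys)) := by
  induction rest generalizing x xt y yt with
  | nil => rfl
  | cons m rest ih =>
      simp only [List.foldl_cons, calcAStep, calcBStep]
      by_cases h456 : PySem.List.pyGetD m 0 0 = 4 ∨ PySem.List.pyGetD m 0 0 = 5 ∨ PySem.List.pyGetD m 0 0 = 6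
      · simp only [h456, if_true]
        exact ih x xt y yt
      · simp only [h456, if_false]
        by_cases heven : PySem.Int.mod (PySem.List.pyGetD m 0 0) 2 = 0
        · simp only [heven, if_true]
          set y' := lastv (y :: yt) + (1 - PySem.List.pyGetD m 0 0) * PySem.List.pyGetD m 1 0 with hy'
          have e : (y :: yt) ++ [y'] = y :: (yt ++ [y']) := rfl
          have h1 : lastv (y :: (yt ++ [y'])) = y' := by rw [← e]; exact lastv_append _ _
          have h2 : maxv (y :: (yt ++ [y'])) = max (maxv (y :: yt)) y' := maxv_append y yt y'
          rw [ite_gt_max]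
          have := ih x xt y (yt ++ [y'])
          rw [h1, h2] at this
          simpa [e] using this
        · simp only [heven, if_false]
          set x' := lastv (x :: xt) + (2 - PySem.List.pyGetD m 0 0) * PySem.List.pyGetD m 1 0 with hx'
          have e : (x :: xt) ++ [x'] = x :: (xt ++ [x']) := rfl
          have h1 : lastv (x :: (xt ++ [x'])) = x' := by rw [← e]; exact lastv_append _ _
          have h2 : maxv (x :: (xt ++ [x'])) = max (maxv (x :: xt)) x' := maxv_append x xt x'
          have h3 : minv (x :: (xt ++ [x'])) = min (minv (x :: xt)) x' := minv_append x xt x'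
          have hmm : minv (x :: xt) ≤ maxv (x :: xt) := minv_le_maxv x xt
          have key := ih x (xt ++ [x']) y yt
          rw [h1, h2, h3] at key
          by_cases hgt : x' > maxv (x :: xt)
          · simp only [hgt, if_true]
            have hmin : min (minv (x :: xt)) x' = minv (x :: xt) := min_eq_left (by omega)
            have hmax : max (maxv (x :: xt)) x' = x' := max_eq_right (by omega)
            rw [hmin, hmax] at key
            have : maxv (x :: xt) + (x' - maxv (x :: xt)) = x' := by ring
            rw [this]
            simpa [e] using key
          · simp only [hgt, if_false]
            by_cases hlt : x' < minv (x :: xt)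
            · simp only [hlt, if_true]
              have hmin : min (minv (x :: xt)) x' = x' := min_eq_right (by omega)
              have hmax : max (maxv (x :: xt)) x' = maxv (x :: xt) := max_eq_left (by omega)
              rw [hmin, hmax] at key
              have : minv (x :: xt) + (x' - minv (x :: xt)) = x' := by ring
              rw [this]
              simpa [e] using key
            · simp only [hlt, if_false]
              have hmin : min (minv (x :: xt)) x' = minv (x :: xt) := min_eq_left (by omega)
              have hmax : max (maxv (x :: xt)) x' = maxv (x :: xt) := max_eq_left (by omega)
              rw [hmin, hmax] at key
              simpa [e] using key

-- ===== VERDICT (by name: the statement is the Claim_ definition above) =====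
theorem calculate_dimension_spec : Claim_equal_calculate_dimension := by
  intro moves _ _
  show calculate_dimension moves = calculate_dimension_alt moves
  have h := main_inv moves 0 [] 0 []
  have e0 : lastv [(0 : Int)] = 0 := by decide
  have e1 : maxv [(0 : Int)] = 0 := by decide
  have e2 : minv [(0 : Int)] = 0 := by decide
  rw [e0, e1, e2] at h
  simp only [calculate_dimension, calculate_dimension_alt, h]
  rcases moves.foldl calcBStep ([0], [0]) with ⟨xs, ys⟩
  simp [lastv, maxv, minv]
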